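-- pv_equiv track=rewrite | github.com/bobthecomputer/crroadtouc | analysis.py | card_cycle_trainer
-- ===== SOURCE A (Python) =====
-- from typing import List, Dict
--
-- def card_cycle_trainer(deck: List[str], plays: List[str]) -> List[List[str]]:
--     """Return the hand (first four cards) before each play."""
--     cycle = deck.copy()
--     hands = []
--     for card in plays:
--         hands.append(cycle[:4])
--         if card in cycle:
--             cycle.remove(card)
--             cycle.append(card)
--     return hands
-- ===== SOURCE B (Python) =====
-- from collections import deque
-- from typing import List
--
--
-- def card_cycle_trainer(deck: List[str], plays: List[str]) -> List[List[str]]: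
--     """Return the hand (first four cards) before each play.
--
--     No full-cycle container is kept.  The state is a 4-card window (the hand),
--     a deque of never-moved cards in deck order (front) and a deque of moved
--     cards in move order (tail), both with lazy deletion (a `moved` set for the
--     front, version stamps for the tail), plus one rotation pointer per card
--     value that yields the instance the next play removes.  Each play is O(1)
--     amortized.
--     """
--     n = len(deck)
--     inst = {}
--     for j, c in enumerate(deck):
--         inst.setdefault(c, []).append(j)
--     ptr = dict.fromkeys(inst, 0)
--     k = 4 if n > 4 else n
--     hand = [(j, deck[j]) for j in range(k)]
--     front = deque((j, deck[j]) for j in range(k, n))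
--     moved = set()
--     tail = deque()
--     ver = {}
--     hands = []
--     for card in plays:
--         hands.append([c for (_, c) in hand])
--         q = inst.get(card)
--         if q is None:
--             continue
--         i = ptr[card]
--         ptr[card] = (i + 1) % len(q)
--         j = q[i]
--         s = ver.get(j, 0) + 1
--         ver[j] = s
--         tail.append((j, card, s))
--         if any(j == x for (x, _) in hand):
--             hand = [(x, c) for (x, c) in hand if x != j]
--             while front and front[0][0] in moved:
--                 front.popleft()
--             if front:
--                 hand.append(front.popleft())
--             else:
--                 while tail:
--                     x, c, t = tail.popleft()
--                     if ver.get(x) == t: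
--                         hand.append((x, c))
--                         break
--         else:
--             moved.add(j)
--     return hands
-- ===== Notes on version B (the rewrite author's own statement) =====
-- stated objective: faster
-- what changed: Instead of keeping the whole cycle as one list and scanning it per play (in / remove / slice), B keeps only a 4-card window plus two lazy-deletion deques (unmoved cards in deck order, moved cards in move order, stale entries marked by a moved-set and version stamps) and a rotation pointer per card value that yields the instance each play removes, so each play is O(1) amortized.
import Mathlib
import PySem

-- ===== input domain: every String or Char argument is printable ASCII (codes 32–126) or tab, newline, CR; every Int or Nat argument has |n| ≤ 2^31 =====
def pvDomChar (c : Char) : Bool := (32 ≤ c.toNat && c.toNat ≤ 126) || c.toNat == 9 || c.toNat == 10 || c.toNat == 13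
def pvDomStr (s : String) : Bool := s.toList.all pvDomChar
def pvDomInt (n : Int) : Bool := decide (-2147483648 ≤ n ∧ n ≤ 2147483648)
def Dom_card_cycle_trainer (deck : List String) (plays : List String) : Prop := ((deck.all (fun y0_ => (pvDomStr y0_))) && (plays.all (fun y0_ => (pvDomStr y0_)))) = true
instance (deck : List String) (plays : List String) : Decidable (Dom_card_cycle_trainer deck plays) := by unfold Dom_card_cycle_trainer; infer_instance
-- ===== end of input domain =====

-- B keeps no full-cycle container: only the 4-card window, lazy-deletion deques
-- (unmoved cards / moved cards) and per-value rotation pointers (objective: faster).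

-- ===== PORT A =====
-- loop body: hands.append(cycle[:4]); if card in cycle: cycle.remove(card); cycle.append(card)
def pvStepA (st : List String × List (List String)) (card : String) :
    List String × List (List String) :=
  let cycle := st.1
  let hands := st.2 ++ [PySem.List.slice cycle none (some 4)]
  if card ∈ cycle then
    (((PySem.List.remove? cycle card).getD cycle) ++ [card], hands)   -- remove is guarded by `card in cycle`, so remove? is `some`
  else (cycle, hands)

def card_cycle_trainer (deck : List String) (plays : List String) : List (List String) :=
  (plays.foldl pvStepA (deck, ([] : List (List String)))).2

-- ===== PORT B =====
-- B's loop state: rotation pointers, the hand window, the two lazy deques with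
-- their deletion markers (moved set, version stamps), and the output
structure PvStB where
  ptr : PySem.Dict String Int
  hand : List (Int × String)
  front : List (Int × String)
  moved : PySem.Set Int
  tail : List (Int × String × Int)
  ver : PySem.Dict Int Int
  hands : List (List String)

-- while front and front[0][0] in moved: front.popleft()
def pvSkipFront (moved : PySem.Set Int) : List (Int × String) → List (Int × String)
  | [] => []
  | p :: rest => if moved.contains p.1 then pvSkipFront moved rest else p :: rest

-- while tail: x, c, t = tail.popleft(); if ver.get(x) == t: hand.append((x, c)); break
def pvPopTail (ver : PySem.Dict Int Int) :
    List (Int × String × Int) → List (Int × String × Int) × Option (Int × String)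
  | [] => ([], none)
  | e :: rest =>
      if ver.get? e.1 == some e.2.2 then (rest, some (e.1, e.2.1)) else pvPopTail ver rest

-- the body of `for card in plays`
def pvStepB (inst : PySem.Dict String (List Int)) (st : PvStB) (card : String) : PvStB :=
  let hands' := st.hands ++ [st.hand.map (·.2)]
  match inst.get? card with
  | none => { st with hands := hands' }
  | some q =>
    let i := (st.ptr.get? card).getD 0        -- ptr[card]: card is a key of ptr whenever it is a key of inst, so get? is some (KeyError unreachable)
    let ptr' := st.ptr.insert card (PySem.Int.mod (i + 1) (q.length : Int))
    let j := (PySem.List.pyGet? q i).getD 0   -- q[i]: 0 ≤ i < len(q) is invariant, so pyGet? is some (IndexError unreachable)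
    let s := st.ver.getD j 0 + 1
    let ver' := st.ver.insert j s
    let tail1 := st.tail ++ [(j, card, s)]
    if st.hand.any (fun p => j == p.1) then
      let hand1 := st.hand.filter (fun p => !(p.1 == j))
      match pvSkipFront st.moved st.front with
      | p :: rest =>
          { ptr := ptr', hand := hand1 ++ [p], front := rest, moved := st.moved,
            tail := tail1, ver := ver', hands := hands' }
      | [] =>
          let pr := pvPopTail ver' tail1
          { ptr := ptr',
            hand := (match pr.2 with | some xc => hand1 ++ [xc] | none => hand1),
            front := [], moved := st.moved, tail := pr.1, ver := ver', hands := hands' }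
    else
      { ptr := ptr', hand := st.hand, front := st.front, moved := st.moved.add j,
        tail := tail1, ver := ver', hands := hands' }

def card_cycle_trainer_alt (deck : List String) (plays : List String) : List (List String) :=
  -- inst.setdefault(c, []).append(j) over enumerate(deck)
  let inst := (PySem.List.enumerate deck 0).foldl
    (fun (d : PySem.Dict String (List Int)) p => d.modify p.2 [] (· ++ [p.1]))
    PySem.Dict.empty
  -- ptr = dict.fromkeys(inst, 0)
  let ptr0 := inst.keys.foldl (fun (d : PySem.Dict String Int) c => d.insert c 0) PySem.Dict.empty
  let n : Int := deck.length
  let k : Int := if n > 4 then 4 else n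
  -- deck[j] for j in range(k) / range(k, n): j is always in range, so pyGetD is exact
  let st0 : PvStB :=
    { ptr := ptr0,
      hand := (PySem.List.pyRange 0 k 1).map (fun j => (j, PySem.List.pyGetD deck j "")),
      front := (PySem.List.pyRange k n 1).map (fun j => (j, PySem.List.pyGetD deck j "")),
      moved := PySem.Set.empty, tail := [], ver := PySem.Dict.empty, hands := [] }
  (plays.foldl (pvStepB inst) st0).hands

-- ===== PRECONDITION & SPEC =====
def Spec_card_cycle_trainer (deck : List String) (plays : List String) (out : List (List String)) : Prop := out = card_cycle_trainer_alt deck plays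
instance (deck : List String) (plays : List String) (out : List (List String)) : Decidable (Spec_card_cycle_trainer deck plays out) := by unfold Spec_card_cycle_trainer; infer_instance

-- ===== CLAIM (what is proved, stated in full; the proofs are below) =====
def Claim_equal_card_cycle_trainer : Prop := ∀ (deck : List String) (plays : List String), Dom_card_cycle_trainer deck plays → Spec_card_cycle_trainer deck plays (card_cycle_trainer deck plays)

-- ===== LEMMAS AND PROOFS =====

-- the live cycle B represents: hand, then live front entries, then live tail entries
def pvLive (st : PvStB) : List (Int × String) :=
  st.hand ++ st.front.filter (fun p => !(st.moved.contains p.1))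
    ++ (st.tail.filter (fun e => st.ver.get? e.1 == some e.2.2)).map (fun e => (e.1, e.2.1))

def pvRot (q : List Int) (i : Int) : List Int := q.drop i.toNat ++ q.take i.toNat

-- coupling invariant of B's state
def pvInvB (inst : PySem.Dict String (List Int)) (st : PvStB) : Prop :=
  ((pvLive st).map (·.1)).Nodup ∧
  (st.front.map (·.1)).Nodup ∧
  st.hand.length = min 4 (pvLive st).length ∧
  (∀ v, inst.get? v = none → ∀ p ∈ pvLive st, p.2 ≠ v) ∧
  (∀ v q, inst.get? v = some q → ∃ i : Int, st.ptr.get? v = some i ∧ 0 ≤ i ∧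
      i < (q.length : Int) ∧
      pvRot q i = ((pvLive st).filter (fun p => p.2 == v)).map (·.1)) ∧
  (∀ e ∈ st.tail, e.2.2 ≤ st.ver.getD e.1 0)

theorem pvRemove_first (u w : List String) (v : String) (hu : ∀ a ∈ u, a ≠ v) :
    PySem.List.remove? (u ++ v :: w) v = some (u ++ w) := by
  induction u with
  | nil => simp
  | cons x xs ih =>
      have hx : x ≠ v := hu x (by simp)
      rw [List.cons_append]
      rw [PySem.List.remove?_cons_of_ne _ hx, ih (fun a ha => hu a (by simp [ha]))]
      rfl

theorem pvFilterMapCons {α β : Type} (L : List α) (q : α → Bool) (f : α → β) (i : β) (rest : List β)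
    (h : (L.filter q).map f = i :: rest) :
    ∃ l1 x l2, L = l1 ++ x :: l2 ∧ (∀ p ∈ l1, q p = false) ∧ q x = true ∧ f x = i ∧
      ((l2.filter q).map f = rest) := by
  induction L with
  | nil => simp at h
  | cons y ys ih =>
      rcases hy : q y with _ | _
      · rw [List.filter_cons_of_neg (by simp [hy])] at h
        obtain ⟨l1, x, l2, rfl, h1, h2, h3, h4⟩ := ih h
        exact ⟨y :: l1, x, l2, rfl, by simpa using ⟨hy, h1⟩, h2, h3, h4⟩
      · rw [List.filter_cons_of_pos hy] at h
        simp only [List.map_cons, List.cons.injEq] at h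
        exact ⟨[], y, ys, by simp, by simp, hy, h.1, h.2⟩

-- removing the unique element whose id is j
theorem pvFilterNeId {α : Type} (f : α → Int) (m1 m2 : List α) (x : α) (j : Int)
    (hx : f x = j) (hnd : (((m1 ++ x :: m2)).map f).Nodup) :
    (m1 ++ x :: m2).filter (fun p => !(f p == j)) = m1 ++ m2 := by
  have hnd' := hnd
  rw [List.map_append, List.map_cons, List.nodup_append] at hnd'
  obtain ⟨h1, h2, hdisj⟩ := hnd'
  have h2' := List.nodup_cons.mp h2
  rw [List.filter_append, List.filter_cons_of_neg (by simp [hx])]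
  rw [List.filter_eq_self.mpr, List.filter_eq_self.mpr]
  · intro p hp
    simp only [Bool.not_eq_eq_eq_not, Bool.not_true, beq_eq_false_iff_ne]
    intro he
    exact h2'.1 (by rw [hx, ← he]; exact List.mem_map_of_mem hp)
  · intro p hp
    have : f p ∉ (x :: m2).map f → f p ≠ j := by
      intro hn he; exact hn (by simp [he, ← hx])
    simp only [Bool.not_eq_eq_eq_not, Bool.not_true, beq_eq_false_iff_ne]
    exact this (fun hmem => hdisj (f p) (List.mem_map_of_mem hp) (f p) hmem rfl)

theorem pvSkipFront_suffix (moved : PySem.Set Int) (front : List (Int × String)) :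
    (pvSkipFront moved front) <:+ front := by
  induction front with
  | nil => simp [pvSkipFront]
  | cons p rest ih =>
      rw [pvSkipFront]
      split
      · exact ih.trans (List.suffix_cons p rest)
      · exact List.suffix_refl _

theorem pvSkipFront_filter (moved : PySem.Set Int) (front : List (Int × String)) :
    (pvSkipFront moved front).filter (fun p => !(moved.contains p.1)) =
      front.filter (fun p => !(moved.contains p.1)) := by
  induction front with
  | nil => simp [pvSkipFront]
  | cons p rest ih =>
      rw [pvSkipFront]
      rcases hp : moved.contains p.1 with _ | _
      · rw [if_neg Bool.false_ne_true]
      · rw [if_pos rfl, ih,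
          List.filter_cons_of_neg (by simp only [hp, Bool.not_true]; exact Bool.false_ne_true)]

theorem pvSkipFront_cons (moved : PySem.Set Int) (front : List (Int × String))
    (p : Int × String) (rest : List (Int × String))
    (h : pvSkipFront moved front = p :: rest) :
    front.filter (fun p => !(moved.contains p.1)) =
      p :: rest.filter (fun p => !(moved.contains p.1)) := by
  have hlive : moved.contains p.1 = false := by
    induction front with
    | nil => simp [pvSkipFront] at h
    | cons x xs ih =>
        rw [pvSkipFront] at h
        rcases hx : moved.contains x.1 with _ | _
        · rw [if_neg (by rw [hx]; exact Bool.false_ne_true)] at h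
          obtain ⟨h1, -⟩ := List.cons.inj h
          rw [← h1]; exact hx
        · rw [if_pos hx] at h; exact ih h
  rw [← pvSkipFront_filter moved front, h,
    List.filter_cons_of_pos (by simp only [hlive, Bool.not_false])]

theorem pvSkipFront_nil (moved : PySem.Set Int) (front : List (Int × String))
    (h : pvSkipFront moved front = []) :
    front.filter (fun p => !(moved.contains p.1)) = [] := by
  rw [← pvSkipFront_filter moved front, h]
  rfl

theorem pvPopTail_suffix (ver : PySem.Dict Int Int) (t : List (Int × String × Int)) :
    (pvPopTail ver t).1 <:+ t := by
  induction t with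
  | nil => simp [pvPopTail]
  | cons e rest ih =>
      rw [pvPopTail]
      split
      · exact (List.suffix_cons e rest)
      · exact ih.trans (List.suffix_cons e rest)

theorem pvPopTail_cons (ver : PySem.Dict Int Int) (t : List (Int × String × Int))
    (e : Int × String × Int) (R : List (Int × String × Int))
    (h : t.filter (fun e => ver.get? e.1 == some e.2.2) = e :: R) :
    (pvPopTail ver t).2 = some (e.1, e.2.1) ∧
      (pvPopTail ver t).1.filter (fun e => ver.get? e.1 == some e.2.2) = R := by
  induction t with
  | nil => simp at h
  | cons x xs ih =>
      rw [pvPopTail]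
      rcases hx : (ver.get? x.1 == some x.2.2) with _ | _
      · rw [List.filter_cons_of_neg (by simp only [hx]; exact Bool.false_ne_true)] at h
        simpa using ih h
      · rw [List.filter_cons_of_pos (by simp [hx])] at h
        simp only [List.cons.injEq] at h
        obtain ⟨rfl, rfl⟩ := h
        simp

-- one rotation step of the per-value pointer
theorem pvRot_step (q : List Int) (i : Int) (h0 : 0 ≤ i) (hl : i < (q.length : Int)) :
    ∃ j rest, pvRot q i = j :: rest ∧ PySem.List.pyGet? q i = some j ∧
      pvRot q (PySem.Int.mod (i + 1) (q.length : Int)) = rest ++ [j] := by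
  have hlen : i.toNat < q.length := by omega
  have hget : PySem.List.pyGet? q i = some q[i.toNat] :=
    PySem.List.pyGet?_eq_some_getElem q h0 hl
  refine ⟨q[i.toNat], q.drop (i.toNat + 1) ++ q.take i.toNat, ?_, hget, ?_⟩
  · rw [pvRot, List.drop_eq_getElem_cons hlen, List.cons_append]
  · have hmodlen : 0 < (q.length : Int) := by omega
    have htake : q.take (i.toNat + 1) = q.take i.toNat ++ [q[i.toNat]] := by
      rw [← List.take_concat_get' q i.toNat hlen]
    by_cases hend : i + 1 = (q.length : Int)
    · have hmod : PySem.Int.mod (i + 1) (q.length : Int) = 0 := by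
        rw [hend, PySem.Int.mod_eq_emod_of_pos hmodlen, Int.emod_self]
      have hdroplen : q.drop (i.toNat + 1) = [] := by
        apply List.drop_eq_nil_of_le; omega
      rw [hmod, pvRot, hdroplen]
      simp only [Int.toNat_zero, List.drop_zero, List.take_zero, List.append_nil,
        List.nil_append]
      have : q = q.take (i.toNat + 1) := by
        rw [List.take_of_length_le]; omega
      exact this.trans htake
    · have hmod : PySem.Int.mod (i + 1) (q.length : Int) = i + 1 := by
        rw [PySem.Int.mod_eq_emod_of_pos hmodlen, Int.emod_eq_of_lt (by omega) (by omega)]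
      have htn : (i + 1).toNat = i.toNat + 1 := by omega
      rw [hmod, pvRot, htn, htake]
      rw [← List.append_assoc]

-- the hand is the first four live cards
theorem pvHand_take (st : PvStB) (h : st.hand.length = min 4 (pvLive st).length) :
    st.hand = (pvLive st).take 4 := by
  obtain ⟨R, hR⟩ : ∃ R, pvLive st = st.hand ++ R :=
    ⟨_, by rw [pvLive, List.append_assoc]⟩
  rw [hR, List.length_append] at h
  rw [hR]
  rcases Nat.le_total 4 (st.hand.length + R.length) with h4 | h4
  · rw [List.take_append_of_le_length (by omega), List.take_of_length_le (by omega)]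
  · have hR0 : R = [] := List.length_eq_zero_iff.mp (by omega)
    subst hR0
    rw [List.append_nil, List.take_of_length_le (by omega)]

-- in a list with distinct ids the decomposition at an element is unique
theorem pvUniqueSplit {α : Type} (f : α → Int) (x : α) :
    ∀ (l1 m1 l2 m2 : List α), ((l1 ++ x :: l2).map f).Nodup →
      l1 ++ x :: l2 = m1 ++ x :: m2 → l1 = m1 ∧ l2 = m2 := by
  intro l1
  induction l1 with
  | nil =>
      intro m1 l2 m2 hnd heq
      cases m1 with
      | nil => simpa using heq
      | cons b m1' =>
          exfalso
          simp only [List.nil_append, List.cons_append, List.cons.injEq] at heq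
          obtain ⟨rfl, heq2⟩ := heq
          simp only [List.nil_append, List.map_cons, List.nodup_cons] at hnd
          exact hnd.1 (by rw [heq2]; simp)
  | cons a l1' ih =>
      intro m1 l2 m2 hnd heq
      cases m1 with
      | nil =>
          exfalso
          simp only [List.nil_append, List.cons_append, List.cons.injEq] at heq
          obtain ⟨rfl, heq2⟩ := heq
          simp only [List.cons_append, List.map_cons, List.nodup_cons] at hnd
          exact hnd.1 (by simp)
      | cons b m1' =>
          simp only [List.cons_append, List.cons.injEq] at heq
          obtain ⟨rfl, heq2⟩ := heq
          have hnd' : ((l1' ++ x :: l2).map f).Nodup := by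
            simp only [List.cons_append, List.map_cons, List.nodup_cons] at hnd
            exact hnd.2
          obtain ⟨h1, h2⟩ := ih m1' l2 m2 hnd' heq2
          exact ⟨by rw [h1], h2⟩

-- an id cannot occur on both sides of an append with distinct ids
theorem pvDisjointIds {α β : Type} (f : α → Int) (g : β → Int) (A : List α) (B : List β) (j : Int)
    (hnd : (A.map f ++ B.map g).Nodup) (ha : j ∈ A.map f) (hb : j ∈ B.map g) : False :=
  (List.disjoint_of_nodup_append hnd) ha hb

-- bumping j's version stamp kills exactly j's live tail entries
theorem pvTailVer (tail : List (Int × String × Int)) (ver : PySem.Dict Int Int) (j s : Int)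
    (hs : ver.getD j 0 < s)
    (hst : ∀ e ∈ tail, e.2.2 ≤ ver.getD e.1 0) :
    tail.filter (fun e => (ver.insert j s).get? e.1 == some e.2.2) =
      (tail.filter (fun e => ver.get? e.1 == some e.2.2)).filter (fun e => !(e.1 == j)) := by
  rw [List.filter_filter]
  apply List.filter_congr
  intro e he
  by_cases hej : e.1 = j
  · have h1 : (ver.insert j s).get? e.1 = some s := by
      rw [hej, PySem.Dict.get?_insert, if_pos rfl]
    have h2 : e.2.2 ≠ s := by
      have := hst e he
      rw [hej] at this
      omega
    have hl : (some s == some e.2.2) = false := by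
      simp only [beq_eq_false_iff_ne, ne_eq, Option.some.injEq]
      exact fun h => h2 h.symm
    rw [h1, hl, hej]
    simp
  · have h1 : (ver.insert j s).get? e.1 = ver.get? e.1 := by
      rw [PySem.Dict.get?_insert, if_neg hej]
    simp [h1, hej]

-- lazily deleting j from the front = filtering it out of the live front
theorem pvFrontAdd (front : List (Int × String)) (moved : PySem.Set Int) (j : Int) :
    front.filter (fun p => !((PySem.Set.add moved j).contains p.1)) =
      (front.filter (fun p => !(moved.contains p.1))).filter (fun p => !(p.1 == j)) := by
  rw [List.filter_filter]
  apply List.filter_congr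
  intro p _
  by_cases h1 : p.1 ∈ moved <;> by_cases h2 : p.1 = j <;> simp [h2, h1]

theorem pvStepB_none (inst : PySem.Dict String (List Int)) (st : PvStB) (card : String)
    (h : inst.get? card = none) :
    pvStepB inst st card = { st with hands := st.hands ++ [st.hand.map (·.2)] } := by
  simp only [pvStepB, h]

theorem pvStepB_some (inst : PySem.Dict String (List Int)) (st : PvStB) (card : String)
    (q : List Int) (i j : Int)
    (hq : inst.get? card = some q) (hptr : st.ptr.get? card = some i)
    (hget : PySem.List.pyGet? q i = some j) :
    pvStepB inst st card =
      (let ptr' := st.ptr.insert card (PySem.Int.mod (i + 1) (q.length : Int));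
       let s := st.ver.getD j 0 + 1;
       let ver' := st.ver.insert j s;
       let tail1 := st.tail ++ [(j, card, s)];
       let hands' := st.hands ++ [st.hand.map (·.2)];
       if st.hand.any (fun p => j == p.1) then
         let hand1 := st.hand.filter (fun p => !(p.1 == j));
         match pvSkipFront st.moved st.front with
         | p :: rest =>
             { ptr := ptr', hand := hand1 ++ [p], front := rest, moved := st.moved,
               tail := tail1, ver := ver', hands := hands' }
         | [] =>
             let pr := pvPopTail ver' tail1
             { ptr := ptr',
               hand := (match pr.2 with | some xc => hand1 ++ [xc] | none => hand1),
               front := [], moved := st.moved, tail := pr.1, ver := ver', hands := hands' }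
       else
         { ptr := ptr', hand := st.hand, front := st.front, moved := st.moved.add j,
           tail := tail1, ver := ver', hands := hands' }) := by
  simp only [pvStepB, hq, hptr, hget, Option.getD_some]

-- reassembling the invariant for the state after a successful play
theorem pvRebuild (inst : PySem.Dict String (List Int)) (st st' : PvStB) (card : String)
    (q : List Int) (i j : Int) (l1 l2 : List (Int × String))
    (hinst : inst.get? card = some q)
    (hnd : ((pvLive st).map (·.1)).Nodup)
    (hnone : ∀ v, inst.get? v = none → ∀ p ∈ pvLive st, p.2 ≠ v)
    (hsome : ∀ v q', inst.get? v = some q' → ∃ iv : Int, st.ptr.get? v = some iv ∧ 0 ≤ iv ∧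
        iv < (q'.length : Int) ∧
        pvRot q' iv = (((pvLive st).filter (fun p => p.2 == v)).map (·.1)))
    (hLdec : pvLive st = l1 ++ (j, card) :: l2)
    (hl1 : ∀ p ∈ l1, (p.2 == card) = false)
    (hi0 : 0 ≤ i) (hil : i < (q.length : Int))
    (hrot' : pvRot q (PySem.Int.mod (i + 1) (q.length : Int)) =
        ((l2.filter (fun p => p.2 == card)).map (·.1)) ++ [j])
    (hL' : pvLive st' = l1 ++ l2 ++ [(j, card)])
    (hptr' : st'.ptr = st.ptr.insert card (PySem.Int.mod (i + 1) (q.length : Int)))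
    (hfr : (st'.front.map (·.1)).Nodup)
    (hhl' : st'.hand.length = min 4 (pvLive st').length)
    (hg' : ∀ e ∈ st'.tail, e.2.2 ≤ st'.ver.getD e.1 0) :
    pvInvB inst st' := by
  have hperm : (l1 ++ l2 ++ [((j : Int), (card : String))]).Perm (l1 ++ (j, card) :: l2) := by
    rw [List.append_assoc]
    exact List.Perm.append_left l1 (List.perm_append_singleton _ _)
  refine ⟨?_, hfr, hhl', ?_, ?_, hg'⟩
  · rw [hL']
    exact ((hperm.map (·.1)).nodup_iff).mpr (by rw [← hLdec]; exact hnd)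
  · intro v hv p hp hpv
    have hpmem : p ∈ pvLive st := by
      rw [hLdec]
      rw [hL'] at hp
      rcases List.mem_append.mp hp with hp' | hp'
      · rcases List.mem_append.mp hp' with h1 | h1
        · exact List.mem_append_left _ h1
        · exact List.mem_append_right _ (List.mem_cons_of_mem _ h1)
      · have : p = (j, card) := by simpa using hp'
        rw [this]
        exact List.mem_append_right _ (List.mem_cons_self)
    exact hnone v hv p hpmem hpv
  · intro v q' hv
    by_cases hvc : v = card
    · subst hvc
      have hqq : q' = q := by rw [hinst] at hv; simpa using hv.symm
      subst hqq
      have hqpos : 0 < (q'.length : Int) := by omega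
      refine ⟨PySem.Int.mod (i + 1) (q'.length : Int), ?_, PySem.Int.mod_nonneg _ hqpos,
        PySem.Int.mod_lt _ hqpos, ?_⟩
      · rw [hptr', PySem.Dict.get?_insert, if_pos rfl]
      · have hfilt : ((l1 ++ l2 ++ [((j : Int), (v : String))]).filter
              (fun p => p.2 == v)) = l2.filter (fun p => p.2 == v) ++ [(j, v)] := by
          rw [List.filter_append, List.filter_append, List.filter_eq_nil_iff.mpr
            (by intro a ha; simp only [Bool.not_eq_true]; exact hl1 a ha)]
          simp
        rw [hrot', hL', hfilt]
        simp
    · obtain ⟨iv, hivp, hiv0, hivl, hivrot⟩ := hsome v q' hv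
      refine ⟨iv, ?_, hiv0, hivl, ?_⟩
      · rw [hptr', PySem.Dict.get?_insert, if_neg hvc]
        exact hivp
      · rw [hivrot, hL', hLdec]
        have hxv : (((j, card) : Int × String).2 == v) = false :=
          beq_eq_false_iff_ne.mpr (fun h => hvc h.symm)
        rw [List.filter_append, List.filter_append, List.filter_append,
          List.filter_cons_of_neg (by simpa using hxv),
          List.filter_cons_of_neg (by simpa using hxv)]
        simp

-- one play step: same hand snapshot, and the invariant carries over
theorem pvStep (inst : PySem.Dict String (List Int)) (st : PvStB) (card : String)
    (hinv : pvInvB inst st) :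
    (pvStepB inst st card).hands =
        st.hands ++ [PySem.List.slice ((pvLive st).map (·.2)) none (some 4)] ∧
    pvInvB inst (pvStepB inst st card) ∧
    (pvLive (pvStepB inst st card)).map (·.2) =
        (pvStepA ((pvLive st).map (·.2), st.hands) card).1 ∧
    (pvStepA ((pvLive st).map (·.2), st.hands) card).2 =
        st.hands ++ [PySem.List.slice ((pvLive st).map (·.2)) none (some 4)] := by
  obtain ⟨hnd, hfnd, hhl, hnone, hsome, htail⟩ := hinv
  have hsnap : PySem.List.slice ((pvLive st).map (·.2)) none (some 4) = st.hand.map (·.2) := by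
    rw [PySem.List.slice_to _ (by norm_num)]
    have h4 : (4 : Int).toNat = 4 := rfl
    rw [h4, ← List.map_take, ← pvHand_take st hhl]
  have hA2 : (pvStepA ((pvLive st).map (·.2), st.hands) card).2 =
      st.hands ++ [PySem.List.slice ((pvLive st).map (·.2)) none (some 4)] := by
    simp only [pvStepA]
    split <;> rfl
  cases hinst : inst.get? card with
  | none =>
      rw [pvStepB_none inst st card hinst]
      have hnotin : card ∉ (pvLive st).map (·.2) := by
        intro hmem
        obtain ⟨p, hp, hps⟩ := List.mem_map.mp hmem
        exact hnone card hinst p hp hps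
      have hlive' : pvLive { st with hands := st.hands ++ [st.hand.map (·.2)] } = pvLive st := rfl
      refine ⟨by rw [hsnap], ?_, ?_, hA2⟩
      · exact ⟨hnd, hfnd, hhl, hnone, hsome, htail⟩
      · rw [hlive']
        simp only [pvStepA]
        rw [if_neg hnotin]
  | some q =>
      obtain ⟨i, hptr, hi0, hil, hrot⟩ := hsome card q hinst
      obtain ⟨j, rest, hrotc, hget, hrot'⟩ := pvRot_step q i hi0 hil
      have hfm : ((pvLive st).filter (fun p => p.2 == card)).map (·.1) = j :: rest := by
        rw [← hrot, hrotc]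
      obtain ⟨l1, x, l2, hLdec, hl1, hxcard, hxj, hl2rest⟩ :=
        pvFilterMapCons (pvLive st) _ _ j rest hfm
      have hx2 : x.2 = card := by simpa using hxcard
      have hxx : x = (j, card) := Prod.ext_iff.mpr ⟨hxj, hx2⟩
      rw [hxx] at hLdec
      rw [← hl2rest] at hrot'
      have hcdec : (pvLive st).map (·.2) = (l1.map (·.2)) ++ card :: (l2.map (·.2)) := by
        rw [hLdec]
        simp
      have hmemc : card ∈ (pvLive st).map (·.2) := by
        rw [hcdec]
        simp
      have hl1v : ∀ a ∈ l1.map (·.2), a ≠ card := by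
        intro a ha he
        obtain ⟨p, hp, rfl⟩ := List.mem_map.mp ha
        have := hl1 p hp
        simp [he] at this
      have hAc : (pvStepA ((pvLive st).map (·.2), st.hands) card).1 =
          (l1 ++ l2 ++ [((j : Int), (card : String))]).map (·.2) := by
        simp only [pvStepA]
        rw [if_pos hmemc, hcdec, pvRemove_first _ _ _ hl1v]
        simp
      have hlenL : (l1 ++ l2 ++ [((j : Int), (card : String))]).length = (pvLive st).length := by
        rw [hLdec]
        simp
      rw [pvStepB_some inst st card q i j hinst hptr hget]
      simp only []
      set s := st.ver.getD j 0 + 1 with hs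
      set ver' := st.ver.insert j s with hver'
      set tail1 := st.tail ++ [(j, card, s)] with htail1
      have hg1 : ∀ e ∈ tail1, e.2.2 ≤ ver'.getD e.1 0 := by
        intro e he
        rcases List.mem_append.mp he with he' | he'
        · have hb := htail e he'
          rw [hver', PySem.Dict.getD_insert]
          split
          · next heq => rw [heq] at hb; omega
          · exact hb
        · have : e = (j, card, s) := by simpa using he'
          rw [this, hver', PySem.Dict.getD_insert, if_pos rfl]
      have htv : st.tail.filter (fun e => ver'.get? e.1 == some e.2.2) =
          (st.tail.filter (fun e => st.ver.get? e.1 == some e.2.2)).filter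
            (fun e => !(e.1 == j)) :=
        pvTailVer st.tail st.ver j s (by omega) htail
      have hnewlive : ((j, card, s) : Int × String × Int).2.2 = s := rfl
      have htl1 : tail1.filter (fun e => ver'.get? e.1 == some e.2.2) =
          (st.tail.filter (fun e => st.ver.get? e.1 == some e.2.2)).filter
            (fun e => !(e.1 == j)) ++ [(j, card, s)] := by
        rw [htail1, List.filter_append, htv]
        congr 1
        simp [hver', PySem.Dict.get?_insert]
      cases hany : st.hand.any (fun p => j == p.1) with
      | true =>
        rw [if_pos rfl]
        set F := st.front.filter (fun p => !(st.moved.contains p.1)) with hF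
        set LTe := st.tail.filter (fun e => st.ver.get? e.1 == some e.2.2) with hLTe
        set T := LTe.map (fun e => (e.1, e.2.1)) with hT
        have hLsplit : pvLive st = st.hand ++ (F ++ T) := by
          rw [hF, hT, hLTe, pvLive, List.append_assoc]
        obtain ⟨p0, hp0, hp0j⟩ := List.any_eq_true.mp hany
        have hxmem : ((j : Int), (card : String)) ∈ pvLive st := by
          rw [hLdec]; simp
        have hp0L : p0 ∈ pvLive st := by
          rw [hLsplit]; exact List.mem_append_left _ hp0
        have hxeq : p0 = ((j : Int), (card : String)) := by
          apply List.inj_on_of_nodup_map hnd hp0L hxmem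
          have : j = p0.1 := by simpa using hp0j
          exact this.symm
        rw [hxeq] at hp0
        obtain ⟨h1, h2, hhdec⟩ := List.append_of_mem hp0
        have hndh : ((h1 ++ ((j : Int), (card : String)) :: h2).map (·.1)).Nodup := by
          have hs : (st.hand.map (·.1)).Sublist ((pvLive st).map (·.1)) := by
            rw [hLsplit, List.map_append]
            exact List.sublist_append_left _ _
          have := hnd.sublist hs
          rw [hhdec] at this
          exact this
        have hhfilt : st.hand.filter (fun p => !(p.1 == j)) = h1 ++ h2 := by
          rw [hhdec]; exact pvFilterNeId (·.1) h1 h2 (j, card) j rfl hndh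
        have hLdec2 : pvLive st = h1 ++ ((j : Int), (card : String)) :: (h2 ++ (F ++ T)) := by
          rw [hLsplit, hhdec]; simp
        obtain ⟨hl1e, hl2e⟩ := pvUniqueSplit (·.1) ((j : Int), (card : String)) l1 h1 l2
          (h2 ++ (F ++ T)) (by rw [← hLdec]; exact hnd) (hLdec.symm.trans hLdec2)
        have hTfilt : LTe.filter (fun e => !(e.1 == j)) = LTe := by
          apply List.filter_eq_self.mpr
          intro e he
          simp only [Bool.not_eq_eq_eq_not, Bool.not_true, beq_eq_false_iff_ne]
          intro hej
          apply pvDisjointIds (·.1) (·.1) st.hand (F ++ T) j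
            (by rw [← List.map_append, ← hLsplit]; exact hnd)
            (List.mem_map.mpr ⟨(j, card), hp0, rfl⟩)
            (by
              rw [List.map_append]
              apply List.mem_append_right
              rw [hT, List.map_map]
              exact List.mem_map.mpr ⟨e, he, hej⟩)
        have htl1' : tail1.filter (fun e => ver'.get? e.1 == some e.2.2) =
            LTe ++ [((j : Int), (card : String), s)] := by
          rw [htl1, hTfilt]
        have hhandlen : st.hand.length = h1.length + h2.length + 1 := by
          rw [hhdec]; simp; omega
        cases hskip : pvSkipFront st.moved st.front with
        | cons p restF =>
          have hFdec : F = p :: restF.filter (fun p => !(st.moved.contains p.1)) := by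
            rw [hF]; exact pvSkipFront_cons _ _ _ _ hskip
          have hL' : pvLive ({ ptr := st.ptr.insert card (PySem.Int.mod (i + 1) (q.length : Int)),
                               hand := st.hand.filter (fun p => !(p.1 == j)) ++ [p], front := restF,
                               moved := st.moved, tail := tail1, ver := ver',
                               hands := st.hands ++ [st.hand.map (·.2)] } : PvStB) =
              l1 ++ l2 ++ [((j : Int), (card : String))] := by
            show (st.hand.filter _ ++ [p]) ++ restF.filter _ ++ (tail1.filter _).map _ = _
            rw [hhfilt, htl1', hl1e, hl2e, hFdec]
            simp [List.append_assoc]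
            rw [← hT]
          refine ⟨by rw [hsnap], ?_, ?_, hA2⟩
          · refine pvRebuild inst st _ card q i j l1 l2 hinst hnd hnone hsome hLdec hl1 hi0 hil
              hrot' hL' rfl ?_ ?_ hg1
            · show (restF.map (·.1)).Nodup
              have hsub : restF.Sublist st.front := by
                have hsuf := pvSkipFront_suffix st.moved st.front
                rw [hskip] at hsuf
                exact (List.sublist_cons_self p restF).trans hsuf.sublist
              exact hfnd.sublist (hsub.map _)
            · show (st.hand.filter (fun p => !(p.1 == j)) ++ [p]).length = min 4 _
              rw [hL', hlenL, hhfilt, ← hhl, hhandlen]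
              simp
              omega
          · rw [hAc, hL']
        | nil =>
          have hFnil : F = [] := by
            rw [hF]; exact pvSkipFront_nil _ _ hskip
          rcases hE : LTe ++ [((j : Int), (card : String), s)] with _ | ⟨e0, R⟩
          · simp at hE
          · have hpop := pvPopTail_cons ver' tail1 e0 R (by rw [htl1', hE])
            have hstep : (match (pvPopTail ver' tail1).2 with
                | some xc => st.hand.filter (fun p => !(p.1 == j)) ++ [xc]
                | none => st.hand.filter (fun p => !(p.1 == j))) =
                st.hand.filter (fun p => !(p.1 == j)) ++ [(e0.1, e0.2.1)] := by
              rw [hpop.1]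
            rw [hstep]
            have hTmap : T ++ [((j : Int), (card : String))] =
                (e0.1, e0.2.1) :: R.map (fun e => (e.1, e.2.1)) := by
              have h := congrArg (List.map (fun e : Int × String × Int => (e.1, e.2.1))) hE
              rw [List.map_append] at h
              simpa [← hT] using h
            have hL' : pvLive ({ ptr := st.ptr.insert card (PySem.Int.mod (i + 1) (q.length : Int)),
                                 hand := st.hand.filter (fun p => !(p.1 == j)) ++ [(e0.1, e0.2.1)],
                                 front := [], moved := st.moved, tail := (pvPopTail ver' tail1).1,
                                 ver := ver', hands := st.hands ++ [st.hand.map (·.2)] } : PvStB) =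
                l1 ++ l2 ++ [((j : Int), (card : String))] := by
              show (st.hand.filter _ ++ [(e0.1, e0.2.1)]) ++ ([] : List (Int × String)).filter _ ++
                  ((pvPopTail ver' tail1).1.filter _).map _ = _
              rw [hhfilt, hpop.2, hl1e, hl2e, hFnil]
              simp [List.append_assoc]
              exact hTmap.symm
            refine ⟨by rw [hsnap], ?_, ?_, hA2⟩
            · refine pvRebuild inst st _ card q i j l1 l2 hinst hnd hnone hsome hLdec hl1 hi0 hil
                hrot' hL' rfl (by simp) ?_ ?_
              · show (st.hand.filter (fun p => !(p.1 == j)) ++ [(e0.1, e0.2.1)]).length = min 4 _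
                rw [hL', hlenL, hhfilt, ← hhl, hhandlen]
                simp
                omega
              · show ∀ e ∈ (pvPopTail ver' tail1).1, e.2.2 ≤ ver'.getD e.1 0
                intro e he
                exact hg1 e ((pvPopTail_suffix ver' tail1).subset he)
            · rw [hAc, hL']
      | false =>
        rw [if_neg Bool.false_ne_true]
        set F := st.front.filter (fun p => !(st.moved.contains p.1)) with hF
        set LTe := st.tail.filter (fun e => st.ver.get? e.1 == some e.2.2) with hLTe
        set T := LTe.map (fun e => (e.1, e.2.1)) with hT
        have hLsplit : pvLive st = st.hand ++ (F ++ T) := by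
          rw [hF, hT, hLTe, pvLive, List.append_assoc]
        have hxmem : ((j : Int), (card : String)) ∈ pvLive st := by
          rw [hLdec]; simp
        have hxnh : ((j : Int), (card : String)) ∉ st.hand := by
          intro h
          have : st.hand.any (fun p => j == p.1) = true :=
            List.any_eq_true.mpr ⟨(j, card), h, by simp⟩
          rw [hany] at this
          exact Bool.false_ne_true this
        have hxFT : ((j : Int), (card : String)) ∈ F ++ T := by
          rw [hLsplit] at hxmem
          rcases List.mem_append.mp hxmem with h | h
          · exact absurd h hxnh
          · exact h
        have hndFT : ((F ++ T).map (·.1)).Nodup := by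
          have := hnd
          rw [hLsplit, List.map_append] at this
          exact (List.nodup_append.mp this).2.1
        have hfrontAdd : st.front.filter (fun p => !((PySem.Set.add st.moved j).contains p.1)) =
            F.filter (fun p => !(p.1 == j)) := by
          rw [hF]; exact pvFrontAdd st.front st.moved j
        have hL'T : (st.tail ++ [((j : Int), (card : String), s)]).filter
            (fun e => ver'.get? e.1 == some e.2.2) = LTe.filter (fun e => !(e.1 == j)) ++ [(j, card, s)] := by
          rw [← htail1]; exact htl1
        rcases List.mem_append.mp hxFT with hxF | hxT
        · -- x live in the front
          obtain ⟨f1, f2, hFdec⟩ := List.append_of_mem hxF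
          have hndF : ((f1 ++ ((j : Int), (card : String)) :: f2).map (·.1)).Nodup := by
            rw [← hFdec]
            rw [hFdec] at hndFT
            have := hndFT
            rw [List.map_append] at this
            have := (List.nodup_append.mp this).1
            rw [hFdec]
            exact this
          have hFfilt : F.filter (fun p => !(p.1 == j)) = f1 ++ f2 := by
            rw [hFdec]; exact pvFilterNeId (·.1) f1 f2 (j, card) j rfl hndF
          have hTfilt : LTe.filter (fun e => !(e.1 == j)) = LTe := by
            apply List.filter_eq_self.mpr
            intro e he
            simp only [Bool.not_eq_eq_eq_not, Bool.not_true, beq_eq_false_iff_ne]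
            intro hej
            apply pvDisjointIds (·.1) (·.1) F T j
              (by rw [← List.map_append]; exact hndFT)
              (by rw [hFdec]; simp)
              (by rw [hT, List.map_map]; exact List.mem_map.mpr ⟨e, he, hej⟩)
          have hLdec2 : pvLive st = (st.hand ++ f1) ++ ((j : Int), (card : String)) :: (f2 ++ T) := by
            rw [hLsplit, hFdec]
            simp
          obtain ⟨hl1e, hl2e⟩ := pvUniqueSplit (·.1) ((j : Int), (card : String)) l1 (st.hand ++ f1)
            l2 (f2 ++ T) (by rw [← hLdec]; exact hnd) (hLdec.symm.trans hLdec2)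
          have hL' : pvLive ({ ptr := st.ptr.insert card (PySem.Int.mod (i + 1) (q.length : Int)),
                               hand := st.hand, front := st.front, moved := st.moved.add j, tail := tail1,
                               ver := ver', hands := st.hands ++ [st.hand.map (·.2)] } : PvStB) =
              l1 ++ l2 ++ [((j : Int), (card : String))] := by
            show st.hand ++ st.front.filter _ ++ (tail1.filter _).map _ = _
            rw [htail1] at *
            rw [hfrontAdd, hL'T, hFfilt, hTfilt, hl1e, hl2e]
            simp
            rw [← hT]
          refine ⟨by rw [hsnap], ?_, ?_, hA2⟩
          · refine pvRebuild inst st _ card q i j l1 l2 hinst hnd hnone hsome hLdec hl1 hi0 hil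
              hrot' hL' rfl hfnd ?_ hg1
            · show st.hand.length = min 4 _
              rw [hL', hlenL]
              exact hhl
          · rw [hAc, hL']
        · -- x live in the tail
          obtain ⟨e, heL, hep⟩ := List.mem_map.mp hxT
          obtain ⟨E1, E2, hEdec⟩ := List.append_of_mem heL
          have he1 : e.1 = j := (Prod.ext_iff.mp hep).1
          have hTdec : T = E1.map (fun e => (e.1, e.2.1)) ++ ((j : Int), (card : String)) ::
              E2.map (fun e => (e.1, e.2.1)) := by
            rw [hT, hEdec]
            simp [hep]
          have hndLTe : ((E1 ++ e :: E2).map (·.1)).Nodup := by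
            have h1 : (T.map (·.1)).Nodup := by
              rw [List.map_append] at hndFT
              exact (List.nodup_append.mp hndFT).2.1
            have h2 : T.map (·.1) = LTe.map (·.1) := by
              rw [hT, List.map_map]
              rfl
            rw [h2, hEdec] at h1
            exact h1
          have hTfilt : LTe.filter (fun e => !(e.1 == j)) = E1 ++ E2 := by
            rw [hEdec]; exact pvFilterNeId (·.1) E1 E2 e j he1 hndLTe
          have hFfilt : F.filter (fun p => !(p.1 == j)) = F := by
            apply List.filter_eq_self.mpr
            intro p hp
            simp only [Bool.not_eq_eq_eq_not, Bool.not_true, beq_eq_false_iff_ne]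
            intro hpj
            apply pvDisjointIds (·.1) (·.1) F T j
              (by rw [← List.map_append]; exact hndFT)
              (by exact List.mem_map.mpr ⟨p, hp, hpj⟩)
              (by rw [hTdec]; simp)
          have hLdec2 : pvLive st = (st.hand ++ F ++ E1.map (fun e => (e.1, e.2.1))) ++
              ((j : Int), (card : String)) :: E2.map (fun e => (e.1, e.2.1)) := by
            rw [hLsplit, hTdec]
            simp
          obtain ⟨hl1e, hl2e⟩ := pvUniqueSplit (·.1) ((j : Int), (card : String)) l1
            (st.hand ++ F ++ E1.map (fun e => (e.1, e.2.1))) l2 (E2.map (fun e => (e.1, e.2.1)))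
            (by rw [← hLdec]; exact hnd) (hLdec.symm.trans hLdec2)
          have hL' : pvLive ({ ptr := st.ptr.insert card (PySem.Int.mod (i + 1) (q.length : Int)),
                               hand := st.hand, front := st.front, moved := st.moved.add j, tail := tail1,
                               ver := ver', hands := st.hands ++ [st.hand.map (·.2)] } : PvStB) =
              l1 ++ l2 ++ [((j : Int), (card : String))] := by
            show st.hand ++ st.front.filter _ ++ (tail1.filter _).map _ = _
            rw [htail1] at *
            rw [hfrontAdd, hL'T, hFfilt, hTfilt, hl1e, hl2e]
            simp
          refine ⟨by rw [hsnap], ?_, ?_, hA2⟩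
          · refine pvRebuild inst st _ card q i j l1 l2 hinst hnd hnone hsome hLdec hl1 hi0 hil
              hrot' hL' rfl hfnd ?_ hg1
            · show st.hand.length = min 4 _
              rw [hL', hlenL]
              exact hhl
          · rw [hAc, hL']

theorem pvMain (inst : PySem.Dict String (List Int)) (plays : List String) :
    ∀ (st : PvStB), pvInvB inst st →
      (plays.foldl (pvStepB inst) st).hands =
        (plays.foldl pvStepA ((pvLive st).map (·.2), st.hands)).2 := by
  induction plays with
  | nil => intro st _; rfl
  | cons card ps ih =>
      intro st hinv
      obtain ⟨hH, hinv', hL, hA⟩ := pvStep inst st card hinv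
      rw [List.foldl_cons, List.foldl_cons]
      have hstep : pvStepA ((pvLive st).map (·.2), st.hands) card =
          ((pvLive (pvStepB inst st card)).map (·.2), (pvStepB inst st card).hands) := by
        rw [Prod.ext_iff]
        exact ⟨by rw [hL], by rw [hA, hH]⟩
      rw [hstep]
      exact ih _ hinv' 

-- proof-side names for B's fixed index and initial state (definitionally those of card_cycle_trainer_alt)
def pvInst (deck : List String) : PySem.Dict String (List Int) :=
  (PySem.List.enumerate deck 0).foldl
    (fun (d : PySem.Dict String (List Int)) p => d.modify p.2 [] (· ++ [p.1]))
    PySem.Dict.empty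

def pvSt0 (deck : List String) : PvStB :=
  { ptr := (pvInst deck).keys.foldl (fun (d : PySem.Dict String Int) c => d.insert c 0) PySem.Dict.empty,
    hand := (PySem.List.pyRange 0 (if (deck.length : Int) > 4 then 4 else (deck.length : Int)) 1).map
      (fun j => (j, PySem.List.pyGetD deck j "")),
    front := (PySem.List.pyRange (if (deck.length : Int) > 4 then 4 else (deck.length : Int)) (deck.length : Int) 1).map
      (fun j => (j, PySem.List.pyGetD deck j "")),
    moved := PySem.Set.empty, tail := [], ver := PySem.Dict.empty, hands := [] }

theorem pvAlt_eq (deck plays : List String) :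
    card_cycle_trainer_alt deck plays = (plays.foldl (pvStepB (pvInst deck)) (pvSt0 deck)).hands := rfl

-- dict.fromkeys(ks, 0) lookup
theorem pvFromkeys (ks : List String) : ∀ (d : PySem.Dict String Int) (v : String),
    (ks.foldl (fun (d : PySem.Dict String Int) c => d.insert c 0) d).get? v =
      if v ∈ ks then some 0 else d.get? v := by
  induction ks with
  | nil => intro d v; simp
  | cons k ks ih =>
      intro d v
      rw [List.foldl_cons, ih]
      by_cases hv : v ∈ ks
      · simp [hv]
      · by_cases hk : v = k <;> simp [PySem.Dict.get?_insert, hv, hk]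

theorem pvLen_hand0 (deck : List String) :
    (pvSt0 deck).hand.length = min 4 deck.length := by
  rcases lt_or_ge 4 deck.length with h4 | h4
  · have : ((deck.length : Int) > 4) := by omega
    simp only [pvSt0, this, if_true, List.length_map, PySem.List.length_pyRange_one]
    omega
  · have : ¬ ((deck.length : Int) > 4) := by omega
    simp only [pvSt0, this, if_false, List.length_map, PySem.List.length_pyRange_one]
    omega

-- the initial state of B represents the deck itself
theorem pvInit (deck : List String) : pvLive (pvSt0 deck) = PySem.List.enumerate deck 0 := by
  have hfilter : ∀ (l : List (Int × String)),
      l.filter (fun p => !(PySem.Set.empty.contains p.1)) = l := by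
    intro l
    apply List.filter_eq_self.mpr
    intro p _
    rfl
  rw [pvLive]
  simp only [pvSt0, hfilter, List.filter_nil, List.map_nil, List.append_nil]
  rw [← List.map_append,
    ← PySem.List.pyRange_one_append 0 (if (deck.length : Int) > 4 then 4 else (deck.length : Int)) (deck.length : Int)
      (by split <;> omega) (by split <;> omega)]
  rw [PySem.List.enumerate_eq_map_pyRange deck ""]
  simp only [PySem.List.len_eq]

-- inst lookups: keys are exactly the deck's values, and the entry of v lists v's positions
theorem pvInst_keys (deck : List String) :
    (pvInst deck).keys = PySem.Set.ofList deck := by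
  rw [pvInst, PySem.Dict.keys_foldl_modify_key]
  rw [PySem.Dict.keys_empty, PySem.Set.update_nil_left, PySem.List.map_snd_enumerate]

theorem pvInst_get?_none (deck : List String) (v : String)
    (h : (pvInst deck).get? v = none) : v ∉ deck := by
  have := (PySem.Dict.get?_eq_none_iff_not_mem_keys _ _).mp h
  rw [pvInst_keys] at this
  exact fun hv => this ((PySem.Set.mem_ofList _ _).mpr hv)

theorem pvInst_get?_some (deck : List String) (v : String) (q : List Int)
    (h : (pvInst deck).get? v = some q) :
    q = ((PySem.List.enumerate deck 0).filter (fun p => p.2 == v)).map (·.1) ∧ v ∈ deck := by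
  constructor
  · have hfold : pvInst deck = ((PySem.List.enumerate deck 0).map Prod.swap).foldl
        (fun (d : PySem.Dict String (List Int)) p => d.modify p.1 [] (· ++ [p.2]))
        PySem.Dict.empty := by
      rw [pvInst, List.foldl_map]
      rfl
    have hg : (pvInst deck).getD v [] =
        ((PySem.List.enumerate deck 0).filter (fun p => p.2 == v)).map (·.1) := by
      rw [hfold, PySem.Dict.getD_foldl_modify_append]
      simp [List.filter_map, Function.comp_def, List.map_map]
    rw [← hg, PySem.Dict.getD_eq_get?_getD, h]
    rfl
  · have hk : v ∈ (pvInst deck).keys := by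
      by_contra hk
      rw [(PySem.Dict.get?_eq_none_iff_not_mem_keys _ _).mpr hk] at h
      simp at h
    rw [pvInst_keys] at hk
    exact (PySem.Set.mem_ofList _ _).mp hk

theorem pvInvB_init (deck : List String) : pvInvB (pvInst deck) (pvSt0 deck) := by
  have hids : (pvLive (pvSt0 deck)).map (·.1) = PySem.List.pyRange 0 (deck.length : Int) 1 := by
    rw [pvInit, PySem.List.map_fst_enumerate]
    norm_num
  refine ⟨?_, ?_, ?_, ?_, ?_, ?_⟩
  · rw [hids]; exact PySem.List.nodup_pyRange_one _ _
  · show ((pvSt0 deck).front.map (·.1)).Nodup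
    have : (pvSt0 deck).front.map (·.1) =
        PySem.List.pyRange (if (deck.length : Int) > 4 then 4 else (deck.length : Int)) (deck.length : Int) 1 := by
      simp [pvSt0, Function.comp_def]
    rw [this]; exact PySem.List.nodup_pyRange_one _ _
  · rw [pvInit, PySem.List.length_enumerate]; exact pvLen_hand0 deck
  · intro v hnone p hp hpv
    have hvdeck : v ∉ deck := pvInst_get?_none deck v hnone
    rw [pvInit] at hp
    apply hvdeck
    rw [← hpv, ← PySem.List.map_snd_enumerate deck 0]
    exact List.mem_map_of_mem hp
  · intro v q hq
    obtain ⟨hqval, hvdeck⟩ := pvInst_get?_some deck v q hq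
    have hmem : v ∈ (pvInst deck).keys := by
      by_contra hk
      rw [(PySem.Dict.get?_eq_none_iff_not_mem_keys _ _).mpr hk] at hq
      simp at hq
    refine ⟨0, ?_, le_refl 0, ?_, ?_⟩
    · show ((pvInst deck).keys.foldl (fun (d : PySem.Dict String Int) c => d.insert c 0)
          PySem.Dict.empty).get? v = some 0
      rw [pvFromkeys, if_pos hmem]
    · have : q ≠ [] := by
        obtain ⟨idx, hidx, hv⟩ := List.mem_iff_getElem.mp hvdeck
        intro h0
        rw [hqval] at h0
        have := List.filter_eq_nil_iff.mp (List.map_eq_nil_iff.mp h0)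
          ((idx : Int), deck[idx]) (by
            rw [PySem.List.mem_enumerate_iff]
            exact ⟨idx, hidx, by simp⟩)
        simp [hv] at this
      have : 0 < q.length := List.length_pos_iff.mpr this
      omega
    · rw [pvRot, pvInit, hqval]
      simp
  · intro e he
    simp [pvSt0] at he

-- ===== VERDICT (by name: the statement is the Claim_ definition above) =====
theorem card_cycle_trainer_spec : Claim_equal_card_cycle_trainer := by
  intro deck plays _
  show card_cycle_trainer deck plays = card_cycle_trainer_alt deck plays
  unfold card_cycle_trainer
  rw [pvAlt_eq, pvMain _ plays _ (pvInvB_init deck), pvInit deck, PySem.List.map_snd_enumerate]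
  rfl
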